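-- pv_equiv track=rewrite | github.com/Pandurangmopgar/AI-enabled-water-well-predictor | src/water_qality/app_1.py | map_drilling_techniques
-- ===== SOURCE A (Python) =====
-- def assign_drilling_technique(rock_type, aquifer_level):
--     if rock_type == 'SR':
--         if aquifer_level in [1, 2]:
--             return 'Rotary Drilling'
--         elif aquifer_level in [3, 4]:
--             return 'Rotary Drilling with Casing'
--     elif rock_type == 'HR':
--         if aquifer_level == 1:
--             return 'Hammer Drilling'
--         elif aquifer_level == 2:
--             return 'Percussive Drilling'
--     return 'Unknown'
--
-- def map_drilling_techniques(row, rock_type):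
--     techniques = []
--     if rock_type == 'SR':
--         for level in range(1, 5):  # SR has 4 aquifer levels
--             techniques.append(assign_drilling_technique('SR', level))
--     elif rock_type == 'HR':
--         for level in range(1, 3):  # HR has 2 aquifer levels
--             techniques.append(assign_drilling_technique('HR', level))
--     return techniques
-- ===== SOURCE B (Python) =====
-- _TECHNIQUES = {
--     'SR': ['Rotary Drilling', 'Rotary Drilling', 'Rotary Drilling with Casing', 'Rotary Drilling with Casing'],
--     'HR': ['Hammer Drilling', 'Percussive Drilling'],
-- }
--
-- def map_drilling_techniques(row, rock_type):
--     return list(_TECHNIQUES.get(rock_type, []))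
-- ===== Notes on version B (the rewrite author's own statement) =====
-- stated objective: simpler
-- what changed: Replaces the helper function and the range loop with an accumulator by a single constant lookup table mapping rock_type to its fully expanded technique list (copied on return).
import Mathlib
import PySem

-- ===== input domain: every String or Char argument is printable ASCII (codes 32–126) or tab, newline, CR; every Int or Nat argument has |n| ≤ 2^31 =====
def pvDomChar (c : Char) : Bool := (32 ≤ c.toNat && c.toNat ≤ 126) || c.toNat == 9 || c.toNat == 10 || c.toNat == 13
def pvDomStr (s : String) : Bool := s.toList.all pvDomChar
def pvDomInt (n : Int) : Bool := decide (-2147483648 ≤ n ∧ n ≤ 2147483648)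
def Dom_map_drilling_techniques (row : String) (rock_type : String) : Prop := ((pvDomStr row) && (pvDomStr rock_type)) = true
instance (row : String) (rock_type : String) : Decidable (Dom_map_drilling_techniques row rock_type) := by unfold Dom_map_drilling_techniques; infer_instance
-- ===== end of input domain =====

-- B replaces A's helper function and range loops by one constant lookup table; objective: simpler.

-- ===== PORT A =====
def assign_drilling_technique (rock_type : String) (aquifer_level : Int) : String :=
  if rock_type = "SR" then
    if aquifer_level ∈ ([1, 2] : List Int) then "Rotary Drilling"
    else if aquifer_level ∈ ([3, 4] : List Int) then "Rotary Drilling with Casing"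
    else "Unknown"
  else if rock_type = "HR" then
    if aquifer_level = 1 then "Hammer Drilling"
    else if aquifer_level = 2 then "Percussive Drilling"
    else "Unknown"
  else "Unknown"

def map_drilling_techniques (row : String) (rock_type : String) : List String :=
  let techniques : List String := []
  if rock_type = "SR" then
    (PySem.List.pyRange 1 5 1).foldl
      (fun acc level => acc ++ [assign_drilling_technique "SR" level]) techniques
  else if rock_type = "HR" then
    (PySem.List.pyRange 1 3 1).foldl
      (fun acc level => acc ++ [assign_drilling_technique "HR" level]) techniques
  else techniques

-- ===== PORT B =====
def pvTechniquesTable : PySem.Dict String (List String) :=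
  PySem.Dict.ofList
    [("SR", ["Rotary Drilling", "Rotary Drilling", "Rotary Drilling with Casing", "Rotary Drilling with Casing"]),
     ("HR", ["Hammer Drilling", "Percussive Drilling"])]

def map_drilling_techniques_alt (row : String) (rock_type : String) : List String :=
  PySem.Dict.getD pvTechniquesTable rock_type []

-- ===== PRECONDITION & SPEC =====
def Spec_map_drilling_techniques (row : String) (rock_type : String) (out : List String) : Prop := out = map_drilling_techniques_alt row rock_type
instance (row : String) (rock_type : String) (out : List String) : Decidable (Spec_map_drilling_techniques row rock_type out) := by unfold Spec_map_drilling_techniques; infer_instance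

-- ===== CLAIM (what is proved, stated in full; the proofs are below) =====
def Claim_equal_map_drilling_techniques : Prop := ∀ (row : String) (rock_type : String), Dom_map_drilling_techniques row rock_type → Spec_map_drilling_techniques row rock_type (map_drilling_techniques row rock_type)

-- ===== LEMMAS AND PROOFS =====

-- ===== VERDICT (by name: the statement is the Claim_ definition above) =====
theorem pvTable_items : pvTechniquesTable.items =
    [("SR", ["Rotary Drilling", "Rotary Drilling", "Rotary Drilling with Casing", "Rotary Drilling with Casing"]),
     ("HR", ["Hammer Drilling", "Percussive Drilling"])] := by decide

theorem map_drilling_techniques_spec : Claim_equal_map_drilling_techniques := by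
  intro row rock_type _
  unfold Spec_map_drilling_techniques map_drilling_techniques map_drilling_techniques_alt
  by_cases hsr : rock_type = "SR"
  · subst hsr; decide
  · by_cases hhr : rock_type = "HR"
    · subst hhr; decide
    · have h1 : ("SR" == rock_type) = false := by simp [Ne.symm hsr]
      have h2 : ("HR" == rock_type) = false := by simp [Ne.symm hhr]
      simp [hsr, hhr, PySem.Dict.getD, PySem.Dict.get?, pvTable_items, List.find?, h1, h2]
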